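-- pv_equiv track=rewrite | github.com/ak43zhang/gs2026 | src/gs2026/dashboard2/services/document_reader.py | _split_strict_by_lines
-- ===== SOURCE A (Python) =====
-- from typing import List, Dict, Optional, Protocol, runtime_checkable
--
-- def _split_strict_by_lines(text: str) -> List[str]:
--     """严格逐行分割策略"""
--     lines = text.split('\n')
--     result = []
--     pending_line = ""
--
--     for line in lines:
--         line = line.strip()
--         if not line:
--             continue
--
--         if line.startswith('*') and pending_line:
--             pending_line = pending_line + line
--             continue
--
--         if line.startswith('*'):
--             pending_line = line
--             continue
--
--         if pending_line:
--             result.append(pending_line)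
--             pending_line = ""
--
--         result.append(line)
--
--     if pending_line:
--         result.append(pending_line)
--
--     return result if result else [text]
-- ===== SOURCE B (Python) =====
-- from typing import List
--
-- def _split_strict_by_lines(text: str) -> List[str]:
--     """Strict line split: group-scan decomposition instead of a pending-line state machine."""
--     items = [s for s in (l.strip() for l in text.split('\n')) if s]
--     out = []
--     i = 0
--     n = len(items)
--     while i < n:
--         if items[i].startswith('*'):
--             j = i
--             while j < n and items[j].startswith('*'):
--                 j += 1
--             out.append(''.join(items[i:j]))
--             i = j
--         else:
--             out.append(items[i])
--             i += 1
--     return out if out else [text]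
-- ===== Notes on version B (the rewrite author's own statement) =====
-- stated objective: alternative
-- what changed: Replaced A's single-pass state machine carrying a pending accumulator with a clean-then-group decomposition: first build the list of stripped non-empty lines, then scan it merging each maximal run of asterisk-prefixed lines into one joined element.
import Mathlib
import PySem

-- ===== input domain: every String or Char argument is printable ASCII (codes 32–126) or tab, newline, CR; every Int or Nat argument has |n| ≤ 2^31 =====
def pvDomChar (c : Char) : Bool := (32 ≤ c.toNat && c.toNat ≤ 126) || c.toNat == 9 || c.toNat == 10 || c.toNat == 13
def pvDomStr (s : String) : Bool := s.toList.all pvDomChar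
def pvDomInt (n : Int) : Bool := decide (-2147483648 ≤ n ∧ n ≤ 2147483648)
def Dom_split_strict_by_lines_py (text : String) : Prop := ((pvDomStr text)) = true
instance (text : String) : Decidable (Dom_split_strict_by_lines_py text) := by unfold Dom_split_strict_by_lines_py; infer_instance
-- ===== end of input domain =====

-- B replaces A's pending-accumulator state machine by a clean-then-group decomposition
-- (first the list of stripped non-empty lines, then a scan merging each maximal run of asterisk-prefixed lines); same cost.

-- ===== PORT A =====
-- the for-loop of A, carrying (result, pending); base case is the final `if pending:` flush
def pvALoop : List String → List String → String → List String
  | [], result, pending => if pending ≠ "" then result ++ [pending] else result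
  | l :: rest, result, pending =>
    let line := PySem.Str.strip l
    if line = "" then pvALoop rest result pending
    else if PySem.Str.startswith line "*" = true ∧ pending ≠ "" then
      pvALoop rest result (pending ++ line)
    else if PySem.Str.startswith line "*" = true then
      pvALoop rest result line
    else if pending ≠ "" then
      pvALoop rest (result ++ [pending, line]) ""
    else
      pvALoop rest (result ++ [line]) ""

def split_strict_by_lines_py (text : String) : List String :=
  let lines := (PySem.Str.split? text "\n").getD []
  let result := pvALoop lines [] ""
  if result ≠ [] then result else [text]

-- ===== PORT B =====
-- the grouping scan of B: an asterisk-prefixed item starts a maximal run (inner while = takeWhile/dropWhile span), joined with ""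
def pvBGroup : List String → List String
  | [] => []
  | x :: rest =>
    if PySem.Str.startswith x "*" = true then
      PySem.Str.join "" (x :: rest.takeWhile (fun s => PySem.Str.startswith s "*"))
        :: pvBGroup (rest.dropWhile (fun s => PySem.Str.startswith s "*"))
    else
      x :: pvBGroup rest
termination_by l => l.length
decreasing_by
  · exact Nat.lt_succ_of_le (List.length_dropWhile_le _ _)
  · simp

def split_strict_by_lines_py_alt (text : String) : List String :=
  let items := (((PySem.Str.split? text "\n").getD []).map PySem.Str.strip).filter (· ≠ "")
  let out := pvBGroup items
  if out ≠ [] then out else [text]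

-- ===== PRECONDITION & SPEC =====
def Spec_split_strict_by_lines_py (text : String) (out : List String) : Prop := out = split_strict_by_lines_py_alt text
instance (text : String) (out : List String) : Decidable (Spec_split_strict_by_lines_py text out) := by unfold Spec_split_strict_by_lines_py; infer_instance

-- ===== CLAIM (what is proved, stated in full; the proofs are below) =====
def Claim_equal_split_strict_by_lines_py : Prop := ∀ (text : String), Dom_split_strict_by_lines_py text → Spec_split_strict_by_lines_py text (split_strict_by_lines_py text)

-- ===== LEMMAS AND PROOFS =====

-- A's loop with the strip-and-skip folded away: it only sees the stripped non-empty items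
def pvACore : List String → List String → String → List String
  | [], res, pend => if pend ≠ "" then res ++ [pend] else res
  | x :: rest, res, pend =>
    if PySem.Str.startswith x "*" = true ∧ pend ≠ "" then pvACore rest res (pend ++ x)
    else if PySem.Str.startswith x "*" = true then pvACore rest res x
    else if pend ≠ "" then pvACore rest (res ++ [pend, x]) ""
    else pvACore rest (res ++ [x]) ""

theorem pvALoop_eq_core (lines : List String) : ∀ res pend,
    pvALoop lines res pend = pvACore ((lines.map PySem.Str.strip).filter (· ≠ "")) res pend := by
  induction lines with
  | nil => intro res pend; rfl
  | cons l rest ih =>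
    intro res pend
    by_cases h : PySem.Str.strip l = "" <;>
      simp [pvALoop, pvACore, h, ih]

theorem pv_star_ne_empty (s : String) (h : PySem.Str.startswith s "*" = true) : s ≠ "" := by
  intro he; subst he; simp [PySem.Str.startswith, PySem.Chars.startswith] at h

theorem pv_star_append (s t : String) (h : PySem.Str.startswith s "*" = true) :
    PySem.Str.startswith (s ++ t) "*" = true := by
  simp only [PySem.Str.startswith_eq, PySem.Chars.startswith_iff, String.toList_append] at *
  exact h.trans (List.prefix_append s.toList t.toList)

theorem pv_join_nil : PySem.Str.join "" ([] : List String) = "" := rfl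

theorem pv_join_cons (x : String) (l : List String) :
    PySem.Str.join "" (x :: l) = x ++ PySem.Str.join "" l := by
  apply String.toList_inj.mp
  cases l with
  | nil => simp [PySem.Chars.join_singleton, PySem.Chars.join_nil]
  | cons y l => simp [PySem.Chars.join_cons_cons]

-- main correspondence: A's core loop equals B's grouping scan, for empty or asterisk-prefixed pending
theorem pv_core_eq_group : ∀ (n : ℕ) (items : List String), items.length ≤ n →
    (∀ res pend, PySem.Str.startswith pend "*" = true →
      pvACore items res pend =
        res ++ (pend ++ PySem.Str.join "" (items.takeWhile (fun s => PySem.Str.startswith s "*")))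
          :: pvBGroup (items.dropWhile (fun s => PySem.Str.startswith s "*"))) ∧
    (∀ res, pvACore items res "" = res ++ pvBGroup items) := by
  intro n
  induction n with
  | zero =>
    intro items hlen
    have : items = [] := by cases items <;> simp_all
    subst this
    refine ⟨fun res pend hp => ?_, fun res => by simp [pvACore, pvBGroup]⟩
    simp [pvACore, pvBGroup, pv_join_nil, pv_star_ne_empty pend hp]
  | succ n ih =>
    intro items hlen
    cases items with
    | nil =>
      refine ⟨fun res pend hp => ?_, fun res => by simp [pvACore, pvBGroup]⟩
      simp [pvACore, pvBGroup, pv_join_nil, pv_star_ne_empty pend hp]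
    | cons x rest =>
      have hr : rest.length ≤ n := by simpa using Nat.le_of_succ_le_succ hlen
      constructor
      · intro res pend hp
        by_cases hx : PySem.Str.startswith x "*" = true
        · have h1 := (ih rest hr).1 res (pend ++ x) (pv_star_append pend x hp)
          rw [pvACore, if_pos ⟨hx, pv_star_ne_empty pend hp⟩, h1,
            List.takeWhile_cons, List.dropWhile_cons, if_pos hx, if_pos hx,
            pv_join_cons, ← String.append_assoc]
        · have hxb : PySem.Chars.startswith x.toList ['*'] = false := by
            simpa using hx
          have h2 := (ih rest hr).2 (res ++ [pend, x])
          rw [pvACore, if_neg (by simp [hxb]), if_neg (by simp [hxb]),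
            if_pos (pv_star_ne_empty pend hp), h2,
            List.takeWhile_cons, List.dropWhile_cons, if_neg (by simp [hxb]),
            if_neg (by simp [hxb]), pv_join_nil, pvBGroup, if_neg (by simp [hxb])]
          simp
      · intro res
        by_cases hx : PySem.Str.startswith x "*" = true
        · have h1 := (ih rest hr).1 res x hx
          rw [pvACore, if_neg (by simp), if_pos hx, h1, pvBGroup, if_pos hx, pv_join_cons]
        · have hxb : PySem.Chars.startswith x.toList ['*'] = false := by simpa using hx
          have h2 := (ih rest hr).2 (res ++ [x])
          rw [pvACore, if_neg (by simp [hxb]), if_neg (by simp [hxb]), if_neg (by simp),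
            h2, pvBGroup, if_neg (by simp [hxb])]
          simp

-- ===== VERDICT (by name: the statement is the Claim_ definition above) =====
theorem split_strict_by_lines_py_spec : Claim_equal_split_strict_by_lines_py := by
  intro text _
  unfold Spec_split_strict_by_lines_py split_strict_by_lines_py split_strict_by_lines_py_alt
  simp only [pvALoop_eq_core, (pv_core_eq_group _ _ le_rfl).2, List.nil_append]
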